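-- pv_equiv track=rewrite | github.com/RazaS/ISBT_extended | geno_mock_python/app.py | variant_target_groups
-- ===== SOURCE A (Python) =====
-- def clean_text(value):
--     if value is None:
--         return ""
--     text = str(value)
--     text = text.replace("\r\n", "\n").replace("\r", "\n")
--     text = text.replace("_x000D_", "")
--     return text
--
-- def first_nonempty_ci(record, candidate_keys):
--     if not isinstance(record, dict):
--         return ""
--     for wanted in candidate_keys:
--         wanted_low = wanted.lower()
--         for key, value in record.items():
--             if clean_text(key).lower() == wanted_low:
--                 txt = clean_text(value).strip()
--                 if txt:
--                     return txt
--     return ""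
--
-- def variant_matches_group(variant_row, selected_group):
--     group = clean_text(selected_group).upper().strip()
--     symbol = first_nonempty_ci(variant_row, ["system_symbol"]).upper()
--     if group in ("RHD", "RHCE"):
--         isbt_allele = first_nonempty_ci(variant_row, ["isbt_allele"]).upper()
--         gene_name = first_nonempty_ci(variant_row, ["gene_name", "gene"]).upper()
--         return isbt_allele.startswith(group + "*") or gene_name == group
--     return symbol == group
--
-- def variant_target_groups(variant_row):
--     symbol = first_nonempty_ci(variant_row, ["system_symbol"]).upper()
--     if not symbol:
--         return []
--     if symbol == "RH":
--         groups = [group for group in ("RHD", "RHCE") if variant_matches_group(variant_row, group)]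
--         return groups
--     return [symbol]
-- ===== SOURCE B (Python) =====
-- def _clean(value):
--     if value is None:
--         return ""
--     text = str(value)
--     text = text.replace("\r\n", "\n").replace("\r", "\n")
--     return text.replace("_x000D_", "")
--
--
-- def _build_index(variant_row):
--     """One pass over the record: first non-empty value per normalized key wins."""
--     index = {}
--     if not isinstance(variant_row, dict):
--         return index
--     for key, value in variant_row.items():
--         nk = _clean(key).lower()
--         txt = _clean(value).strip()
--         if index.get(nk, "") == "":
--             index[nk] = txt
--     return index
--
--
-- def _lookup(index, candidate_keys):
--     for k in candidate_keys:
--         v = index.get(k.lower(), "")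
--         if v:
--             return v
--     return ""
--
--
-- def variant_target_groups(variant_row):
--     index = _build_index(variant_row)
--     symbol = _lookup(index, ["system_symbol"]).upper()
--     if not symbol:
--         return []
--     if symbol != "RH":
--         return [symbol]
--     isbt_allele = _lookup(index, ["isbt_allele"]).upper()
--     gene_name = _lookup(index, ["gene_name", "gene"]).upper()
--     out = []
--     for group in ("RHD", "RHCE"):
--         if isbt_allele.startswith(group + "*") or gene_name == group:
--             out.append(group)
--     return out
-- ===== Notes on version B (the rewrite author's own statement) =====
-- stated objective: simpler
-- what changed: B scans the record once to build a normalized-key index (first non-empty value per cleaned+lowercased key wins) and then answers every candidate-key query by a single dict lookup, instead of A's re-scanning the whole record for every candidate key on every call (A walks the record up to five times via nested loops).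
import Mathlib
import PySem

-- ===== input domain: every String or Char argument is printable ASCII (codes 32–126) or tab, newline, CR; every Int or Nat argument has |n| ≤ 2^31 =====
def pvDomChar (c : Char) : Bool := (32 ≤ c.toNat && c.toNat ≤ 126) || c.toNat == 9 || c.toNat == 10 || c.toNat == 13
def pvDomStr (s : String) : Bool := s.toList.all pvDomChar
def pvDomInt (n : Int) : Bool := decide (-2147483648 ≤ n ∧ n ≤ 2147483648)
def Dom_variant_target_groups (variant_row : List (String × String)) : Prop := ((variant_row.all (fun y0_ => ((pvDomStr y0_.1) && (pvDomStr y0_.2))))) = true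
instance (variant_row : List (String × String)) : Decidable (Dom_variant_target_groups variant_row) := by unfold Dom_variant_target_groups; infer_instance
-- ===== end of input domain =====

-- B replaces A's repeated nested scans of the record by a single normalized-key index
-- built in one pass (first non-empty value per key wins), then plain dict lookups (objective: simpler).

-- ===== PORT A =====
-- clean_text (values here are always strings, never None)
def pvCleanA (s : String) : String :=
  PySem.Str.replace (PySem.Str.replace (PySem.Str.replace s "\r\n" "\n") "\r" "\n") "_x000D_" ""

-- the inner 'for key, value in record.items()' loop of first_nonempty_ci for one wanted key
def pvInnerA (wlow : String) : List (String × String) → Option String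
  | [] => none
  | (k, v) :: rest =>
    if PySem.Str.lower (pvCleanA k) == wlow then
      let txt := PySem.Str.strip (pvCleanA v)
      if txt ≠ "" then some txt else pvInnerA wlow rest
    else pvInnerA wlow rest

-- first_nonempty_ci (record is always a dict here)
def pvFirstA (record : List (String × String)) : List String → String
  | [] => ""
  | w :: ws =>
    match pvInnerA (PySem.Str.lower w) record with
    | some t => t
    | none => pvFirstA record ws

def pvMatchesA (variant_row : List (String × String)) (selected_group : String) : Bool :=
  let group := PySem.Str.strip (PySem.Str.upper (pvCleanA selected_group))
  let symbol := PySem.Str.upper (pvFirstA variant_row ["system_symbol"])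
  if group == "RHD" || group == "RHCE" then
    let isbt_allele := PySem.Str.upper (pvFirstA variant_row ["isbt_allele"])
    let gene_name := PySem.Str.upper (pvFirstA variant_row ["gene_name", "gene"])
    PySem.Str.startswith isbt_allele (group ++ "*") || gene_name == group
  else symbol == group

def variant_target_groups (variant_row : List (String × String)) : List String :=
  let symbol := PySem.Str.upper (pvFirstA variant_row ["system_symbol"])
  if symbol == "" then []
  else if symbol == "RH" then
    (["RHD", "RHCE"].filter (fun group => pvMatchesA variant_row group))
  else [symbol]

-- ===== PORT B =====
def pvCleanB (s : String) : String :=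
  PySem.Str.replace (PySem.Str.replace (PySem.Str.replace s "\r\n" "\n") "\r" "\n") "_x000D_" ""

-- _build_index: one pass, first non-empty value per normalized key wins
def pvIndexB (variant_row : List (String × String)) : PySem.Dict String String :=
  variant_row.foldl
    (fun d kv =>
      let nk := PySem.Str.lower (pvCleanB kv.1)
      let txt := PySem.Str.strip (pvCleanB kv.2)
      if d.getD nk "" == "" then d.insert nk txt else d)
    PySem.Dict.empty

-- _lookup
def pvLookupB (index : PySem.Dict String String) : List String → String
  | [] => ""
  | k :: ks =>
    let v := index.getD (PySem.Str.lower k) ""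
    if v ≠ "" then v else pvLookupB index ks

def variant_target_groups_alt (variant_row : List (String × String)) : List String :=
  let index := pvIndexB variant_row
  let symbol := PySem.Str.upper (pvLookupB index ["system_symbol"])
  if symbol == "" then []
  else if symbol != "RH" then [symbol]
  else
    let isbt_allele := PySem.Str.upper (pvLookupB index ["isbt_allele"])
    let gene_name := PySem.Str.upper (pvLookupB index ["gene_name", "gene"])
    ["RHD", "RHCE"].foldl
      (fun out group =>
        if PySem.Str.startswith isbt_allele (group ++ "*") || gene_name == group
        then out ++ [group] else out)
      []

-- ===== PRECONDITION & SPEC =====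
def Spec_variant_target_groups (variant_row : List (String × String)) (out : List String) : Prop := out = variant_target_groups_alt variant_row
instance (variant_row : List (String × String)) (out : List String) : Decidable (Spec_variant_target_groups variant_row out) := by unfold Spec_variant_target_groups; infer_instance

-- ===== CLAIM (what is proved, stated in full; the proofs are below) =====
def Claim_equal_variant_target_groups : Prop := ∀ (variant_row : List (String × String)), Dom_variant_target_groups variant_row → Spec_variant_target_groups variant_row (variant_target_groups variant_row)

-- ===== LEMMAS AND PROOFS =====

-- the two clean helpers are the same text transformation
theorem pvCleanB_eq (s : String) : pvCleanB s = pvCleanA s := rfl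

-- A's inner scan only ever returns a non-empty string
theorem pvInnerA_ne_empty (w : String) (rec : List (String × String)) (t : String)
    (h : pvInnerA w rec = some t) : t ≠ "" := by
  induction rec with
  | nil => simp [pvInnerA] at h
  | cons kv rest ih =>
    obtain ⟨k, v⟩ := kv
    simp only [pvInnerA] at h
    split_ifs at h with h1 h2
    · exact (Option.some_inj.mp h) ▸ h2
    · exact ih h
    · exact ih h

-- invariant of B's index-building fold: a lookup in the built index is the old value if
-- that was non-empty, else the first non-empty matching value of the remaining record
theorem pvIndexB_fold_getD (rec : List (String × String)) (d : PySem.Dict String String) (w : String) :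
    (rec.foldl
      (fun d kv =>
        let nk := PySem.Str.lower (pvCleanB kv.1)
        let txt := PySem.Str.strip (pvCleanB kv.2)
        if d.getD nk "" == "" then d.insert nk txt else d) d).getD w ""
    = if d.getD w "" ≠ "" then d.getD w "" else (pvInnerA w rec).getD "" := by
  induction rec generalizing d with
  | nil => simp [pvInnerA]
  | cons kv rest ih =>
    obtain ⟨k, v⟩ := kv
    simp only [List.foldl_cons]
    rw [ih]
    simp only [pvInnerA, pvCleanB_eq]
    by_cases hk : PySem.Str.lower (pvCleanA k) = w
    · subst hk
      by_cases hc : d.getD (PySem.Str.lower (pvCleanA k)) "" = ""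
      · by_cases ht : PySem.Str.strip (pvCleanA v) = ""
        · simp [hc, ht, PySem.Dict.getD_insert_self]
        · simp [hc, ht, PySem.Dict.getD_insert_self]
      · simp [hc]
    · have hk' : w ≠ PySem.Str.lower (pvCleanA k) := fun h => hk h.symm
      by_cases hc : d.getD (PySem.Str.lower (pvCleanA k)) "" = ""
      · simp [hc, PySem.Dict.getD_insert, hk, hk']
      · simp [hc, hk]

-- a lookup in B's index is exactly A's inner scan (empty-defaulted)
theorem pvIndexB_getD (rec : List (String × String)) (w : String) :
    (pvIndexB rec).getD w "" = (pvInnerA w rec).getD "" := by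
  rw [pvIndexB, pvIndexB_fold_getD]
  simp [PySem.Dict.getD_empty]

-- B's candidate-key lookup equals A's first_nonempty_ci
theorem pvLookupB_eq_pvFirstA (rec : List (String × String)) (ws : List String) :
    pvLookupB (pvIndexB rec) ws = pvFirstA rec ws := by
  induction ws with
  | nil => simp [pvLookupB, pvFirstA]
  | cons w ws ih =>
    simp only [pvLookupB, pvFirstA, pvIndexB_getD]
    cases h : pvInnerA (PySem.Str.lower w) rec with
    | none => simpa using ih
    | some t =>
      have := pvInnerA_ne_empty _ _ _ h
      simp [this]

-- A's group test, instantiated at the two literal groups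
theorem pvMatchesA_RHD (rec : List (String × String)) :
    pvMatchesA rec "RHD"
    = (PySem.Str.startswith (PySem.Str.upper (pvFirstA rec ["isbt_allele"])) ("RHD" ++ "*")
       || (PySem.Str.upper (pvFirstA rec ["gene_name", "gene"]) == "RHD")) := by
  have e1 : PySem.Str.strip (PySem.Str.upper (pvCleanA "RHD")) = "RHD" := by decide
  simp [pvMatchesA, e1]

theorem pvMatchesA_RHCE (rec : List (String × String)) :
    pvMatchesA rec "RHCE"
    = (PySem.Str.startswith (PySem.Str.upper (pvFirstA rec ["isbt_allele"])) ("RHCE" ++ "*")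
       || (PySem.Str.upper (pvFirstA rec ["gene_name", "gene"]) == "RHCE")) := by
  have e2 : PySem.Str.strip (PySem.Str.upper (pvCleanA "RHCE")) = "RHCE" := by decide
  have b1 : (("RHCE" : String) == "RHD") = false := by decide
  simp [pvMatchesA, e2, b1]

-- ===== VERDICT (by name: the statement is the Claim_ definition above) =====
theorem variant_target_groups_spec : Claim_equal_variant_target_groups := by
  intro rec _
  unfold Spec_variant_target_groups variant_target_groups variant_target_groups_alt
  simp only [pvLookupB_eq_pvFirstA]
  by_cases hsym : PySem.Str.upper (pvFirstA rec ["system_symbol"]) = ""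
  · simp [hsym]
  · by_cases hrh : PySem.Str.upper (pvFirstA rec ["system_symbol"]) = "RH"
    · simp only [hrh]
      simp only [List.filter_cons, List.filter_nil, List.foldl_cons, List.foldl_nil,
        pvMatchesA_RHD, pvMatchesA_RHCE]
      cases hb1 : (PySem.Str.startswith (PySem.Str.upper (pvFirstA rec ["isbt_allele"])) ("RHD" ++ "*")
          || (PySem.Str.upper (pvFirstA rec ["gene_name", "gene"]) == "RHD")) <;>
      cases hb2 : (PySem.Str.startswith (PySem.Str.upper (pvFirstA rec ["isbt_allele"])) ("RHCE" ++ "*")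
          || (PySem.Str.upper (pvFirstA rec ["gene_name", "gene"]) == "RHCE")) <;>
      simp [*]
    · simp [hsym, hrh]
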